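-- pv_equiv track=rewrite | github.com/wodudttjs/p-ade | ingestion/downloader.py | _detect_url_field
-- ===== SOURCE A (Python) =====
-- from typing import Optional, Dict, Callable, List, Iterable
--
-- def _detect_url_field(fieldnames: List[str]) -> Optional[str]:
--     if not fieldnames:
--         return None
--     lowered = [f.lower() for f in fieldnames]
--     for candidate in ("url", "video_url", "video", "link"):
--         if candidate in lowered:
--             return fieldnames[lowered.index(candidate)]
--     return fieldnames[0]
-- ===== SOURCE B (Python) =====
-- # Single pass over fieldnames keeping the best-ranked candidate (strict < keeps first occurrence).
-- _RANK = {"url": 0, "video_url": 1, "video": 2, "link": 3}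
--
-- def _detect_url_field(fieldnames):
--     if not fieldnames:
--         return None
--     best = None
--     best_rank = None
--     for f in fieldnames:
--         r = _RANK.get(f.lower())
--         if r is not None and (best_rank is None or r < best_rank):
--             best, best_rank = f, r
--     return best if best is not None else fieldnames[0]
-- ===== Notes on version B (the rewrite author's own statement) =====
-- stated objective: alternative
-- what changed: A scans the lowered header list once per candidate (membership test plus .index per candidate); B builds a candidate-to-rank dict and makes a single pass over the fields, keeping the field with the strictly smallest rank seen (strict < keeps the first occurrence), falling back to fieldnames[0].
import Mathlib
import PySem

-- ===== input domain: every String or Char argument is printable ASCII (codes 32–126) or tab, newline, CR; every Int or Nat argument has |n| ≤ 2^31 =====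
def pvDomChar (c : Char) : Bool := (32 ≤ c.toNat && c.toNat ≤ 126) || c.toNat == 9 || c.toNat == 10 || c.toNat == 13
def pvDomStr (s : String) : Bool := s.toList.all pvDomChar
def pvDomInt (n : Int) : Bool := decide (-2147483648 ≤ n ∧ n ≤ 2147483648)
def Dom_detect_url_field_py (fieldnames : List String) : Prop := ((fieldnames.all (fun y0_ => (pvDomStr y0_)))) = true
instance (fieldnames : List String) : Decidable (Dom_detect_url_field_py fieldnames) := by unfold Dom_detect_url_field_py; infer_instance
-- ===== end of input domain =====

-- B changes the decomposition: one pass over the fields keeping the best-ranked candidate, instead of A's scan per candidate.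

-- ===== PORT A =====
-- the 'for candidate in (...)' loop with early return; after the loop: 'return fieldnames[0]'
def detectLoopA (fieldnames lowered : List String) : List String → Option String
  | [] => fieldnames[0]?
  | c :: cs =>
    if lowered.contains c then
      (PySem.List.index? lowered c).bind (fun i => fieldnames[i]?)
    else detectLoopA fieldnames lowered cs

def detect_url_field_py (fieldnames : List String) : Option String :=
  if fieldnames = [] then none
  else
    let lowered := fieldnames.map PySem.Str.lower
    detectLoopA fieldnames lowered ["url", "video_url", "video", "link"]

-- ===== PORT B =====
def rankB : PySem.Dict String Nat :=
  PySem.Dict.ofList [("url", 0), ("video_url", 1), ("video", 2), ("link", 3)]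

-- the loop body: r = _RANK.get(f.lower()); if r is not None and (best_rank is None or r < best_rank): best = (f, r)
def stepB (best : Option (String × Nat)) (f : String) : Option (String × Nat) :=
  match PySem.Dict.get? rankB (PySem.Str.lower f) with
  | none => best
  | some r =>
    match best with
    | none => some (f, r)
    | some (_, br) => if r < br then some (f, r) else best

def detect_url_field_py_alt (fieldnames : List String) : Option String :=
  if fieldnames = [] then none
  else
    match fieldnames.foldl stepB none with
    | some (f, _) => some f
    | none => fieldnames[0]?

-- ===== PRECONDITION & SPEC =====
def Spec_detect_url_field_py (fieldnames : List String) (out : Option String) : Prop := out = detect_url_field_py_alt fieldnames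
instance (fieldnames : List String) (out : Option String) : Decidable (Spec_detect_url_field_py fieldnames out) := by unfold Spec_detect_url_field_py; infer_instance

-- ===== CLAIM (what is proved, stated in full; the proofs are below) =====
def Claim_equal_detect_url_field_py : Prop := ∀ (fieldnames : List String), Dom_detect_url_field_py fieldnames → Spec_detect_url_field_py fieldnames (detect_url_field_py fieldnames)

-- ===== LEMMAS AND PROOFS =====

-- rank via the literal dict, as an if-chain
theorem rank_eq (s : String) :
    PySem.Dict.get? rankB s =
      (if "url" = s then some 0 else if "video_url" = s then some 1
       else if "video" = s then some 2 else if "link" = s then some 3 else none) := by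
  have h : rankB = PySem.Dict.mk [("url", 0), ("video_url", 1), ("video", 2), ("link", 3)] := by
    decide
  rw [h]
  simp only [PySem.Dict.get?_mk_cons]
  have h0 : PySem.Dict.get? (PySem.Dict.mk ([] : List (String × Nat))) s = none := by
    simp [PySem.Dict.get?]
  rw [h0]
  simp only [beq_iff_eq]

-- first field whose lowered form is c
def findLow (c : String) (l : List String) : Option String :=
  l.find? (fun f => PySem.Str.lower f == c)

-- the priority chain of first matches
def chainOf (l : List String) : Option (String × Nat) :=
  ((findLow "url" l).map (·, 0)).or (((findLow "video_url" l).map (·, 1)).or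
    (((findLow "video" l).map (·, 2)).or ((findLow "link" l).map (·, 3))))

-- A's 'fieldnames[lowered.index(candidate)]' is the first field lowering to the candidate
theorem pick_eq_find (l : List String) (c : String) :
    (PySem.List.index? (l.map PySem.Str.lower) c).bind (fun i => l[i]?) = findLow c l := by
  induction l with
  | nil => simp [PySem.List.index?_eq_idxOf?, findLow]
  | cons x xs ih =>
    rw [List.map_cons]
    by_cases h : PySem.Str.lower x = c
    · rw [h, PySem.List.index?_cons_self]
      simp [findLow, List.find?_cons, h]
    · rw [PySem.List.index?_cons_of_ne _ h]
      have hcons : findLow c (x :: xs) = findLow c xs := by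
        simp [findLow, List.find?_cons, h]
      rw [hcons, ← ih]
      cases hidx : PySem.List.index? (xs.map PySem.Str.lower) c <;> simp [hidx]

theorem contains_low (l : List String) (c : String) :
    (l.map PySem.Str.lower).contains c = (findLow c l).isSome := by
  rcases hf : findLow c l with _ | a
  · simp only [findLow, List.find?_eq_none] at hf
    simp only [List.contains_eq_any_beq, Option.isSome_none, List.any_map, List.any_eq_false]
    intro f hfmem
    have h2 : PySem.Str.lower f ≠ c := by simpa using hf f hfmem
    simpa using fun hc => h2 hc.symm
  · have hp := List.find?_some hf
    have hmem := List.mem_of_find?_eq_some hf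
    have h2 : PySem.Str.lower a = c := by simpa using hp
    simp only [List.contains_eq_any_beq, Option.isSome_some, List.any_map, List.any_eq_true]
    exact ⟨a, hmem, by simp [h2]⟩

-- merging an accumulator with the best of the rest
def combineB (a b : Option (String × Nat)) : Option (String × Nat) :=
  match a, b with
  | none, b => b
  | some p, none => some p
  | some (f, br), some (g, s) => if s < br then some (g, s) else some (f, br)

-- best-ranked field, first occurrence at each rank
def bestOf : List String → Option (String × Nat)
  | [] => none
  | x :: xs =>
    match PySem.Dict.get? rankB (PySem.Str.lower x) with
    | none => bestOf xs
    | some r =>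
      some (match bestOf xs with
            | none => (x, r)
            | some (g, s) => if s < r then (g, s) else (x, r))

theorem foldl_stepB (l : List String) : ∀ acc,
    l.foldl stepB acc = combineB acc (bestOf l) := by
  induction l with
  | nil => intro acc; cases acc <;> simp [bestOf, combineB]
  | cons x xs ih =>
    intro acc
    rw [List.foldl_cons, ih]
    show combineB (stepB acc x) (bestOf xs) = combineB acc (bestOf (x :: xs))
    cases hr : PySem.Dict.get? rankB (PySem.Str.lower x) with
    | none => simp [stepB, bestOf, hr]
    | some r =>
      cases acc with
      | none =>
        cases hb : bestOf xs with
        | none => simp [stepB, bestOf, hr, hb, combineB]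
        | some p => cases p with
          | mk g s =>
            by_cases h2 : s < r <;> simp [stepB, bestOf, hr, hb, combineB, h2]
      | some p =>
        cases p with
        | mk f br =>
          cases hb : bestOf xs with
          | none =>
            by_cases h1 : r < br <;> simp [stepB, bestOf, hr, hb, combineB, h1]
          | some q =>
            cases q with
            | mk g s =>
              by_cases h1 : r < br <;> by_cases h2 : s < r <;> by_cases h3 : s < br <;>
                simp [stepB, bestOf, hr, hb, combineB, h1, h2, h3] <;>
                first | rfl | omega

-- bestOf is the priority chain of first matches
theorem bestOf_eq_chain (l : List String) : bestOf l = chainOf l := by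
  induction l with
  | nil => simp [bestOf, chainOf, findLow]
  | cons x xs ih =>
    have hfind : ∀ c, findLow c (x :: xs) =
        if c = PySem.Str.lower x then some x else findLow c xs := by
      intro c
      by_cases h : c = PySem.Str.lower x
      · subst h; simp [findLow, List.find?_cons]
      · rw [if_neg h]; simp [findLow, List.find?_cons, Ne.symm h]
    by_cases e0 : ("url" : String) = PySem.Str.lower x
    · simp only [bestOf, rank_eq, ih, chainOf, hfind, ← e0]
      rcases h0 : findLow "url" xs with _ | a <;>
      rcases h1 : findLow "video_url" xs with _ | b <;>
      rcases h2 : findLow "video" xs with _ | c <;>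
      rcases h3 : findLow "link" xs with _ | d <;> simp [h0, h1, h2, h3]
    · by_cases e1 : ("video_url" : String) = PySem.Str.lower x
      · simp only [bestOf, rank_eq, ih, chainOf, hfind, ← e1]
        rcases h0 : findLow "url" xs with _ | a <;>
        rcases h1 : findLow "video_url" xs with _ | b <;>
        rcases h2 : findLow "video" xs with _ | c <;>
        rcases h3 : findLow "link" xs with _ | d <;> simp [h0, h1, h2, h3]
      · by_cases e2 : ("video" : String) = PySem.Str.lower x
        · simp only [bestOf, rank_eq, ih, chainOf, hfind, ← e2]
          rcases h0 : findLow "url" xs with _ | a <;>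
          rcases h1 : findLow "video_url" xs with _ | b <;>
          rcases h2 : findLow "video" xs with _ | c <;>
          rcases h3 : findLow "link" xs with _ | d <;> simp [h0, h1, h2, h3]
        · by_cases e3 : ("link" : String) = PySem.Str.lower x
          · simp only [bestOf, rank_eq, ih, chainOf, hfind, ← e3]
            rcases h0 : findLow "url" xs with _ | a <;>
            rcases h1 : findLow "video_url" xs with _ | b <;>
            rcases h2 : findLow "video" xs with _ | c <;>
            rcases h3 : findLow "link" xs with _ | d <;> simp [h0, h1, h2, h3]
          · simp only [bestOf, rank_eq, ih, chainOf, hfind,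
              if_neg e0, if_neg e1, if_neg e2, if_neg e3]

-- ===== VERDICT (by name: the statement is the Claim_ definition above) =====
theorem detect_url_field_py_spec : Claim_equal_detect_url_field_py := by
  intro l _
  show detect_url_field_py l = detect_url_field_py_alt l
  by_cases hnil : l = []
  · simp [detect_url_field_py, detect_url_field_py_alt, hnil]
  · simp only [detect_url_field_py, detect_url_field_py_alt, if_neg hnil]
    rw [foldl_stepB, bestOf_eq_chain]
    show detectLoopA l (l.map PySem.Str.lower) ["url", "video_url", "video", "link"] = _
    simp only [detectLoopA, contains_low, pick_eq_find, combineB]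
    rcases h0 : findLow "url" l with _ | a <;>
    rcases h1 : findLow "video_url" l with _ | b <;>
    rcases h2 : findLow "video" l with _ | c <;>
    rcases h3 : findLow "link" l with _ | d <;> simp [chainOf, h0, h1, h2, h3]
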